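-- pv_equiv track=rewrite | github.com/NXKXTA/Pytest | num_3.py | count_repeating_chars
-- ===== SOURCE A (Python) =====
-- def count_repeating_chars(text: str) -> int:
--     if not isinstance(text, str):
--         raise ValueError("Строка должна быть строкой")
--
--     if not text:
--         return 0
--
--     char_counts = {}
--     for char in text:
--         char_counts[char] = char_counts.get(char, 0) + 1
--
--     repeating_chars = 0
--     for count in char_counts.values():
--         if count > 1:
--             repeating_chars += count - 1
--
--     return repeating_chars
-- ===== SOURCE B (Python) =====
-- def count_repeating_chars(text: str) -> int:
--     if not isinstance(text, str):
--         raise ValueError("Строка должна быть строкой")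
--     return len(text) - len(set(text))
-- ===== Notes on version B (the rewrite author's own statement) =====
-- stated objective: simpler
-- what changed: Replaces the frequency-dict loop and the summation loop with the closed form len(text) - len(set(text)) (total length minus distinct characters).
import Mathlib
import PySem

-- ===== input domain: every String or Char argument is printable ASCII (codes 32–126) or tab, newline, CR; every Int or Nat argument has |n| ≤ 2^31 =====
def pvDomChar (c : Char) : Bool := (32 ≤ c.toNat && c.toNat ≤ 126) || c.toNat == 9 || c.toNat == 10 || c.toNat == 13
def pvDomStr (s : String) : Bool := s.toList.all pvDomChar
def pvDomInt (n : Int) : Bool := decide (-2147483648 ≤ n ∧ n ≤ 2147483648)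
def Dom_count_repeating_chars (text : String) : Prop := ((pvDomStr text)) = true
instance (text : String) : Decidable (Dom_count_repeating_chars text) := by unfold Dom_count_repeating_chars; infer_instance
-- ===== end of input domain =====

-- B replaces A's frequency-dict and summation loops with the closed form len(text) - len(set(text)).


-- ===== PORT A =====
def count_repeating_chars (text : String) : Int :=
  if text.toList = [] then 0
  else
    let char_counts : PySem.Dict Char Int :=
      text.toList.foldl (fun d c => d.insert c (d.getD c 0 + 1)) PySem.Dict.empty
    char_counts.values.foldl (fun acc count => if count > 1 then acc + (count - 1) else acc) 0

-- ===== PORT B =====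
def count_repeating_chars_alt (text : String) : Int :=
  PySem.Str.len text - PySem.Set.len (PySem.Set.ofList text.toList)

-- ===== PRECONDITION & SPEC =====
def Spec_count_repeating_chars (text : String) (out : Int) : Prop := out = count_repeating_chars_alt text
instance (text : String) (out : Int) : Decidable (Spec_count_repeating_chars text out) := by unfold Spec_count_repeating_chars; infer_instance

-- ===== CLAIM (what is proved, stated in full; the proofs are below) =====
def Claim_equal_count_repeating_chars : Prop := ∀ (text : String), Dom_count_repeating_chars text → Spec_count_repeating_chars text (count_repeating_chars text)

-- ===== LEMMAS AND PROOFS =====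

-- A's summation loop over values all ≥ 1 computes sum - length.
theorem pv_fold_counts (vals : List Int) (acc : Int) (h : ∀ c ∈ vals, 1 ≤ c) :
    vals.foldl (fun acc count => if count > 1 then acc + (count - 1) else acc) acc
      = acc + vals.sum - vals.length := by
  induction vals generalizing acc with
  | nil => simp
  | cons v vs ih =>
    have hv : 1 ≤ v := h v (by simp)
    have := ih (if v > 1 then acc + (v - 1) else acc) (fun c hc => h c (by simp [hc]))
    simp only [List.foldl_cons, List.sum_cons, List.length_cons] at *
    rw [this]
    split_ifs with hgt <;> push_cast <;> omega

-- sum of counts over the distinct elements = length of the list.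
theorem pv_sum_counts (l : List Char) :
    ((PySem.Set.ofList l).map (fun k => l.count k)).sum = l.length := by
  have hperm : (PySem.Set.ofList l).Perm l.dedup := by
    apply (List.perm_ext_iff_of_nodup (PySem.Set.nodup_ofList l) l.nodup_dedup).mpr
    intro x
    simp [PySem.Set.mem_ofList, List.mem_dedup]
  calc ((PySem.Set.ofList l).map (fun k => l.count k)).sum
      = (l.dedup.map (fun k => l.count k)).sum := (hperm.map _).sum_eq
    _ = l.length := l.sum_map_count_dedup_eq_length

-- ===== VERDICT (by name: the statement is the Claim_ definition above) =====
theorem count_repeating_chars_spec : Claim_equal_count_repeating_chars := by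
  intro text _
  unfold Spec_count_repeating_chars count_repeating_chars count_repeating_chars_alt
  simp only [PySem.Str.len, PySem.Set.len]
  set l := text.toList with hl
  by_cases hnil : l = []
  · simp [hnil]
  · simp only [hnil, if_false]
    rw [PySem.Dict.foldl_insert_getD_add_one_eq_counter]
    have hvals : (PySem.Dict.counter l).values
        = (PySem.Set.ofList l).map (fun k => (l.count k : Int)) := by
      have := PySem.Dict.items_counter (xs := l)
      simp [PySem.Dict.values, this]
    rw [hvals, pv_fold_counts]
    · have hs := pv_sum_counts l
      have hsum : ((PySem.Set.ofList l).map (fun k => (l.count k : Int))).sum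
          = (l.length : Int) := by
        rw [← hs]; push_cast
        rw [List.map_map]; rfl
      simp [hsum]
    · intro c hc
      simp only [List.mem_map] at hc
      obtain ⟨k, hk, rfl⟩ := hc
      have : k ∈ l := (PySem.Set.mem_ofList l k).mp hk
      have := List.count_pos_iff.mpr this
      omega
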